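-- pv_equiv track=rewrite | github.com/fedoretsigor-cloud/linkedin-xray-search-toolkit | src/search_orchestrator.py | ordered_query_group_keys
-- ===== SOURCE A (Python) =====
-- def ordered_query_group_keys(query_plan, by_query_group, final_candidates):
--     ordered = []
--     seen = set()
--     for query_info in query_plan or []:
--         if query_info.get("query_type") == "location_verification":
--             continue
--         group_id = query_info.get("query_group_id") or "unknown"
--         if group_id not in seen:
--             seen.add(group_id)
--             ordered.append(group_id)
--     for group_map in (by_query_group or {}, final_candidates or {}):
--         for group_id in group_map:
--             if group_id not in seen:
--                 seen.add(group_id)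
--                 ordered.append(group_id)
--     return ordered
-- ===== SOURCE B (Python) =====
-- def ordered_query_group_keys(query_plan, by_query_group, final_candidates):
--     # Stage 1: build the raw key stream (filtered plan keys, then both maps' keys).
--     stream = [
--         (qi.get("query_group_id") or "unknown")
--         for qi in (query_plan or [])
--         if qi.get("query_type") != "location_verification"
--     ] + list(by_query_group or {}) + list(final_candidates or {})
--     # Stage 2: first-occurrence dedup without a seen set: repeatedly take the head
--     # and filter every later copy of it out of the remaining stream.
--     ordered = []
--     while stream:
--         head = stream[0]
--         ordered.append(head)
--         stream = [k for k in stream[1:] if k != head]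
--     return ordered
-- ===== Notes on version B (the rewrite author's own statement) =====
-- stated objective: alternative
-- what changed: B first materialises the whole raw key stream, then deduplicates with a nub-style head-extract loop (take the head, filter all its later copies out of the rest) instead of A's single pass carrying a seen-set and ordered-list pair.
import Mathlib
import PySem

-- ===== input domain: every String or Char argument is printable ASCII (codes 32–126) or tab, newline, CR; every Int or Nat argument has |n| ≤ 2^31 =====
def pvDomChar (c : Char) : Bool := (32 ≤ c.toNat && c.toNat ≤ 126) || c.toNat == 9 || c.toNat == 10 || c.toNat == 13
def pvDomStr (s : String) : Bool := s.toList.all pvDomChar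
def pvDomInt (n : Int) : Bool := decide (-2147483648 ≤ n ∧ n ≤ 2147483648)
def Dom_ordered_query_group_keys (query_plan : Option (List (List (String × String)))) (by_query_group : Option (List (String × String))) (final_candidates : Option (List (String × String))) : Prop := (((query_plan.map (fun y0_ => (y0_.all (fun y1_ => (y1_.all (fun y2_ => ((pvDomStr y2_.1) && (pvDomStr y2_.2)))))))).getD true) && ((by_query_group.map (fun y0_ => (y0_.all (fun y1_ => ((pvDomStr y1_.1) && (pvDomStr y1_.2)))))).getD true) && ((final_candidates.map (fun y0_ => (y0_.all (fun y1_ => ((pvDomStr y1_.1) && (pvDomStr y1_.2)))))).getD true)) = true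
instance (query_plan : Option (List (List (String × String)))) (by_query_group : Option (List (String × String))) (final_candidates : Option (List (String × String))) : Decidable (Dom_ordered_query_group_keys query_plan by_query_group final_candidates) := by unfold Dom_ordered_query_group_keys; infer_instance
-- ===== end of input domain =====

-- B builds the raw key stream first, then deduplicates with a nub-style head-extract/filter loop instead of A's seen-set pass; objective: alternative.


-- ===== PORT A =====
-- A: one pass keeping (ordered, seen) together; dedup interleaved with key extraction.
def oqgkStep (st : List String × PySem.Set String) (g : String) : List String × PySem.Set String :=
  if PySem.Set.contains st.2 g then st else (st.1 ++ [g], PySem.Set.add st.2 g)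

def ordered_query_group_keys (query_plan : Option (List (List (String × String)))) (by_query_group : Option (List (String × String))) (final_candidates : Option (List (String × String))) : List String :=
  let st1 := (query_plan.getD []).foldl (fun st query_info =>
      if (PySem.Dict.ofList query_info).get? "query_type" == some "location_verification" then st
      else oqgkStep st (match (PySem.Dict.ofList query_info).get? "query_group_id" with
                        | some s => if s = "" then "unknown" else s
                        | none => "unknown")) ([], PySem.Set.empty)
  let st2 := [(by_query_group.getD []), (final_candidates.getD [])].foldl
      (fun st group_map => (PySem.Dict.ofList group_map).keys.foldl oqgkStep st) st1
  st2.1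

-- ===== PORT B =====
-- B: stage 1 builds the raw key stream; stage 2 dedups by repeatedly taking the head
-- and filtering its later copies out of the rest (the while-loop in Source B).
def oqgkKey (query_info : List (String × String)) : String :=
  match (PySem.Dict.ofList query_info).get? "query_group_id" with
  | some s => if s = "" then "unknown" else s
  | none => "unknown"

def oqgkStream (query_plan : Option (List (List (String × String)))) (by_query_group : Option (List (String × String))) (final_candidates : Option (List (String × String))) : List String :=
  ((query_plan.getD []).filter (fun query_info =>
      !((PySem.Dict.ofList query_info).get? "query_type" == some "location_verification"))).map oqgkKey
  ++ (PySem.Dict.ofList (by_query_group.getD [])).keys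
  ++ (PySem.Dict.ofList (final_candidates.getD [])).keys

def oqgkNub : List String → List String
  | [] => []
  | h :: t => h :: oqgkNub (t.filter (fun k => k ≠ h))
termination_by l => l.length
decreasing_by
  simp only [List.length_unattach, List.length_cons, Nat.lt_succ_iff]
  exact le_trans (List.length_filter_le _ _) (by simp)

def ordered_query_group_keys_alt (query_plan : Option (List (List (String × String)))) (by_query_group : Option (List (String × String))) (final_candidates : Option (List (String × String))) : List String :=
  oqgkNub (oqgkStream query_plan by_query_group final_candidates)

-- ===== PRECONDITION & SPEC =====
def Spec_ordered_query_group_keys (query_plan : Option (List (List (String × String)))) (by_query_group : Option (List (String × String))) (final_candidates : Option (List (String × String))) (out : List String) : Prop := out = ordered_query_group_keys_alt query_plan by_query_group final_candidates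
instance (query_plan : Option (List (List (String × String)))) (by_query_group : Option (List (String × String))) (final_candidates : Option (List (String × String))) (out : List String) : Decidable (Spec_ordered_query_group_keys query_plan by_query_group final_candidates out) := by unfold Spec_ordered_query_group_keys; infer_instance

-- ===== CLAIM (what is proved, stated in full; the proofs are below) =====
def Claim_equal_ordered_query_group_keys : Prop := ∀ (query_plan : Option (List (List (String × String)))) (by_query_group : Option (List (String × String))) (final_candidates : Option (List (String × String))), Dom_ordered_query_group_keys query_plan by_query_group final_candidates → Spec_ordered_query_group_keys query_plan by_query_group final_candidates (ordered_query_group_keys query_plan by_query_group final_candidates)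

-- ===== LEMMAS AND PROOFS =====

theorem oqgkNub_nil : oqgkNub [] = [] := oqgkNub.eq_1
theorem oqgkNub_cons (h : String) (t : List String) :
    oqgkNub (h :: t) = h :: oqgkNub (t.filter (fun k => k ≠ h)) := oqgkNub.eq_2 h t

-- A's dedup step on a doubled state is Set.add on both components.
theorem oqgkStep_diag (s : PySem.Set String) (g : String) :
    oqgkStep (s, s) g = (PySem.Set.add s g, PySem.Set.add s g) := by
  by_cases h : g ∈ s
  · simp [oqgkStep, h]
  · simp [oqgkStep, h]

-- Folding A's dedup step over any key list from a doubled state is Set.update on both components.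
theorem foldl_oqgkStep_diag (ks : List String) (s : PySem.Set String) :
    ks.foldl oqgkStep (s, s) = (PySem.Set.update s ks, PySem.Set.update s ks) := by
  induction ks generalizing s with
  | nil => simp [PySem.Set.update_nil]
  | cons g ks ih => simp only [List.foldl_cons, oqgkStep_diag, PySem.Set.update_cons, ih]

-- A's first loop from a doubled state = Set.update with the filtered, mapped key list.
theorem foldl_plan_diag (plan : List (List (String × String))) (s : PySem.Set String) :
    plan.foldl (fun st query_info =>
      if (PySem.Dict.ofList query_info).get? "query_type" == some "location_verification" then st
      else oqgkStep st (match (PySem.Dict.ofList query_info).get? "query_group_id" with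
                        | some s => if s = "" then "unknown" else s
                        | none => "unknown")) (s, s)
    = (PySem.Set.update s ((plan.filter (fun query_info =>
        !((PySem.Dict.ofList query_info).get? "query_type" == some "location_verification"))).map oqgkKey),
       PySem.Set.update s ((plan.filter (fun query_info =>
        !((PySem.Dict.ofList query_info).get? "query_type" == some "location_verification"))).map oqgkKey)) := by
  induction plan generalizing s with
  | nil => simp [PySem.Set.update_nil]
  | cons qi plan ih =>
    rw [List.foldl_cons]
    by_cases h : ((PySem.Dict.ofList qi).get? "query_type" == some "location_verification") = true
    · rw [if_pos h, List.filter_cons_of_neg (by simpa using h), ih]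
    · rw [if_neg h, List.filter_cons_of_pos (by simpa using h), List.map_cons,
        show (match (PySem.Dict.ofList qi).get? "query_group_id" with
              | some s => if s = "" then "unknown" else s
              | none => "unknown") = oqgkKey qi from rfl,
        oqgkStep_diag, ih, PySem.Set.update_cons]

-- Set.update s xs appends s with exactly the nub of xs's keys that are not already in s.
theorem update_eq_append_nub (xs : List String) (s : PySem.Set String) :
    PySem.Set.update s xs = s ++ oqgkNub (xs.filter (fun k => !(PySem.Set.contains s k))) := by
  induction xs generalizing s with
  | nil => simp [PySem.Set.update_nil, oqgkNub_nil]
  | cons h t ih =>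
    rw [PySem.Set.update_cons]
    by_cases hm : h ∈ s
    · have hadd : PySem.Set.add s h = s := by simp [PySem.Set.add, hm]
      rw [hadd, List.filter_cons_of_neg (by simp [PySem.Set.contains, hm]), ih]
    · have hadd : PySem.Set.add s h = s ++ [h] := by simp [PySem.Set.add, hm]
      rw [hadd, ih, List.filter_cons_of_pos (by simp [PySem.Set.contains, hm]), oqgkNub_cons,
        List.append_assoc, List.cons_append, List.nil_append]
      congr 3
      rw [List.filter_filter]
      apply List.filter_congr
      intro k _
      by_cases hk : k = h <;> simp [PySem.Set.contains, hk, hm, List.mem_append]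

-- First-occurrence dedup is the nub recursion.
theorem ofList_eq_nub (xs : List String) : PySem.Set.ofList xs = oqgkNub xs := by
  have := update_eq_append_nub xs PySem.Set.empty
  simpa [PySem.Set.ofList_eq_foldl, PySem.Set.update, PySem.Set.empty, PySem.Set.contains] using this

-- ===== VERDICT (by name: the statement is the Claim_ definition above) =====
theorem ordered_query_group_keys_spec : Claim_equal_ordered_query_group_keys := by
  intro qp bq fc _
  show ordered_query_group_keys qp bq fc = ordered_query_group_keys_alt qp bq fc
  simp only [ordered_query_group_keys, ordered_query_group_keys_alt, oqgkStream]
  rw [show (([] : List String), (PySem.Set.empty : PySem.Set String))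
        = ((PySem.Set.empty : PySem.Set String), (PySem.Set.empty : PySem.Set String)) from rfl,
      foldl_plan_diag]
  simp only [List.foldl_cons, List.foldl_nil, foldl_oqgkStep_diag]
  rw [← ofList_eq_nub]
  simp [PySem.Set.ofList_append, PySem.Set.update_nil_left, PySem.Set.update_append]
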